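-- pv_equiv track=rewrite | github.com/fderyckel/ifitwala_ed | ifitwala_ed/assessment/task_outcome_service.py | _select_official_contribution
-- ===== SOURCE A (Python) =====
-- def _select_official_contribution(contributions):
-- 	moderator_types = {"Moderator"}
-- 	self_types = {"Self", "Official Override"}
--
-- 	for row in contributions:
-- 		if row.get("contribution_type") in moderator_types:
-- 			return row
-- 	for row in contributions:
-- 		if row.get("contribution_type") in self_types:
-- 			return row
-- 	return None
-- ===== SOURCE B (Python) =====
-- def _select_official_contribution(contributions):
-- 	fallback = None
-- 	for row in contributions:
-- 		ct = row.get("contribution_type")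
-- 		if ct == "Moderator":
-- 			return row
-- 		if fallback is None and (ct == "Self" or ct == "Official Override"):
-- 			fallback = row
-- 	return fallback
-- ===== Notes on version B (the rewrite author's own statement) =====
-- stated objective: alternative
-- what changed: Replaced A's two sequential scans (first for a Moderator row, then for a Self/Official Override row) by a single pass that returns the first Moderator immediately and remembers the first Self/Official Override row as a fallback.
import Mathlib
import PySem

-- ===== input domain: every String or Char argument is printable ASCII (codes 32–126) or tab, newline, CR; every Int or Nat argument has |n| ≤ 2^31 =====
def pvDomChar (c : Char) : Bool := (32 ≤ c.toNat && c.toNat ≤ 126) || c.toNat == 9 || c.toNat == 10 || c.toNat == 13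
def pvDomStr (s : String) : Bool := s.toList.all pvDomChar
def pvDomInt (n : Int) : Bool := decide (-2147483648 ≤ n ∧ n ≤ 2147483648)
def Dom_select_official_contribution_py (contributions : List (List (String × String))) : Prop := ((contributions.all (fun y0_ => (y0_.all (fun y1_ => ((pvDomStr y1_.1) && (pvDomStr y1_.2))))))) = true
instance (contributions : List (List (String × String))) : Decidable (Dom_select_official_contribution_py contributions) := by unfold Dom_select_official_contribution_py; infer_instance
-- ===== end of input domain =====

-- B replaces A's two sequential scans by a single pass that returns the first
-- Moderator row immediately and remembers the first Self/Official-Override row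
-- as a fallback (objective: alternative/simpler single traversal).

-- ===== PORT A =====
-- row.get("contribution_type") : first match in the association list (dict lookup)
def ctGet (row : List (String × String)) : Option String :=
  PySem.Dict.get? (PySem.Dict.mk row) "contribution_type"

def moderator_types : PySem.Set String := PySem.Set.ofList ["Moderator"]
def self_types : PySem.Set String := PySem.Set.ofList ["Self", "Official Override"]

-- 'row.get(...) in <set>' : None is never in the set
def optInSet (o : Option String) (s : PySem.Set String) : Bool :=
  match o with
  | none => false
  | some v => PySem.Set.contains s v

-- first for-loop of A
def loopA1 : List (List (String × String)) → Option (List (String × String))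
  | [] => none
  | row :: rest => if optInSet (ctGet row) moderator_types then some row else loopA1 rest

-- second for-loop of A
def loopA2 : List (List (String × String)) → Option (List (String × String))
  | [] => none
  | row :: rest => if optInSet (ctGet row) self_types then some row else loopA2 rest

def select_official_contribution_py (contributions : List (List (String × String))) : Option (List (String × String)) :=
  match loopA1 contributions with
  | some row => some row
  | none => loopA2 contributions

-- ===== PORT B =====
-- single pass with a remembered fallback
def loopB : List (List (String × String)) → Option (List (String × String)) → Option (List (String × String))
  | [], fallback => fallback
  | row :: rest, fallback =>
    let ct := ctGet row
    if ct == some "Moderator" then some row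
    else loopB rest
      (if fallback.isNone && (ct == some "Self" || ct == some "Official Override") then some row else fallback)

def select_official_contribution_py_alt (contributions : List (List (String × String))) : Option (List (String × String)) :=
  loopB contributions none

-- ===== PRECONDITION & SPEC =====
def Spec_select_official_contribution_py (contributions : List (List (String × String))) (out : Option (List (String × String))) : Prop := out = select_official_contribution_py_alt contributions
instance (contributions : List (List (String × String))) (out : Option (List (String × String))) : Decidable (Spec_select_official_contribution_py contributions out) := by unfold Spec_select_official_contribution_py; infer_instance

-- ===== CLAIM (what is proved, stated in full; the proofs are below) =====
def Claim_equal_select_official_contribution_py : Prop := ∀ (contributions : List (List (String × String))), Dom_select_official_contribution_py contributions → Spec_select_official_contribution_py contributions (select_official_contribution_py contributions)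

-- ===== LEMMAS AND PROOFS =====

-- A's Moderator-set test is the equality test B uses
lemma mod_cond (o : Option String) :
    optInSet o moderator_types = (o == some "Moderator") := by
  cases o
  · rfl
  · rw [Bool.eq_iff_iff]
    simp [optInSet, moderator_types, PySem.Set.ofList, PySem.Set.add, PySem.Set.contains]

-- A's Self-set test is the disjunction B uses
lemma self_cond (o : Option String) :
    optInSet o self_types = (o == some "Self" || o == some "Official Override") := by
  cases o
  · rfl
  · rw [Bool.eq_iff_iff]
    simp [optInSet, self_types, PySem.Set.ofList, PySem.Set.add, PySem.Set.contains]

-- invariant of B's single pass: it equals "first Moderator, else fallback, else first Self/Override"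
lemma loopB_spec (c : List (List (String × String))) :
    ∀ fb, loopB c fb =
      match loopA1 c with
      | some r => some r
      | none => match fb with
        | some f => some f
        | none => loopA2 c := by
  induction c with
  | nil => intro fb; cases fb <;> simp [loopB, loopA1, loopA2]
  | cons row rest ih =>
    intro fb
    simp only [loopB, loopA1, loopA2, mod_cond, self_cond]
    by_cases hm : (ctGet row == some "Moderator") = true
    · simp [hm]
    · simp only [Bool.not_eq_true] at hm
      simp only [hm, if_false, Bool.false_eq_true, ih]
      by_cases hs : (ctGet row == some "Self" || ctGet row == some "Official Override") = true
      · cases fb <;> simp [hs]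
      · simp only [Bool.not_eq_true] at hs
        cases fb <;> simp [hs]

-- ===== VERDICT (by name: the statement is the Claim_ definition above) =====
theorem select_official_contribution_py_spec : Claim_equal_select_official_contribution_py := by
  intro c _
  unfold Spec_select_official_contribution_py select_official_contribution_py select_official_contribution_py_alt
  rw [loopB_spec c none]
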